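-- pv_equiv track=rewrite | github.com/EgorCry/Deep_Learning_Playground | Решение задач с собеседований/Climbing_Stairs_M_Steps.py | climb_stairs_m
-- ===== SOURCE A (Python) =====
-- def climb_stairs_m(n, m):
--     nswr = [1] * m
--
--     for i in range(n - m + 1):
--         temp = nswr.copy()
--         nswr[0] = nswr[0] + nswr[m-1]
--         for j in range(1, m):
--             nswr[j] = temp[j-1]
--
--     return nswr[0]
-- ===== SOURCE B (Python) =====
-- def climb_stairs_m(n, m):
--     # In-place circular buffer with a moving cursor: no per-iteration copy
--     # and no inner shift loop.
--     buf = [1] * m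
--     i = 0
--     for _ in range(n - m + 1):
--         buf[i] = buf[i - 1] + buf[i]
--         i = i + 1 if i + 1 < m else 0
--     return buf[i - 1]
-- ===== Notes on version B (the rewrite author's own statement) =====
-- stated objective: alternative
-- what changed: Replaces A's fixed-size rotating buffer (a full list copy plus an O(m) inner shift loop per outer iteration) by a single in-place circular-buffer update with a moving cursor: constant work per iteration, no copy and no inner loop.
import Mathlib
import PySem

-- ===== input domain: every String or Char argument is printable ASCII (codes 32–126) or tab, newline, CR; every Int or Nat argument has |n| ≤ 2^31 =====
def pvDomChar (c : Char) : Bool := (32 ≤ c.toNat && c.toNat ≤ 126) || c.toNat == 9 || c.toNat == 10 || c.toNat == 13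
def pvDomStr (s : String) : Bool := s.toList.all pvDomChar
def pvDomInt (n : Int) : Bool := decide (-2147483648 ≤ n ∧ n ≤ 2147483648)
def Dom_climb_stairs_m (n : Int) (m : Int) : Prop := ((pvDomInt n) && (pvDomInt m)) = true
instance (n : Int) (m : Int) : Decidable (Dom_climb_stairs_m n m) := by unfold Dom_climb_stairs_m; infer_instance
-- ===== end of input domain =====

-- B replaces A's per-iteration list copy + inner shift loop by a single in-place
-- circular-buffer update with a moving cursor (objective: alternative).


-- ===== PORT A =====
-- Literal port of A: rotating fixed-size buffer, copied and shifted each iteration.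
-- Index reads use pyGet? with .getD 0: under Pre_ (m ≥ 1) every access is in range,
-- so the default is never taken (Python raises exactly on m ≤ 0, excluded by Pre_).
def climb_stairs_m (n : Int) (m : Int) : Int :=
  let nswr : List Int := List.replicate m.toNat 1      -- [1] * m  (non-positive m gives [])
  let nswr :=
    (PySem.List.pyRange 0 (n - m + 1) 1).foldl (fun nswr _i =>
      let temp := nswr                                  -- temp = nswr.copy()
      let nswr := nswr.set 0
        (((PySem.List.pyGet? nswr 0).getD 0) + ((PySem.List.pyGet? nswr (m-1)).getD 0))
      -- for j in range(1, m): nswr[j] = temp[j-1]   (j ≥ 1 and j < m = len(nswr), so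
      -- List.set at j.toNat is exactly Python's in-range element assignment)
      (PySem.List.pyRange 1 m 1).foldl (fun ns j =>
        ns.set j.toNat ((PySem.List.pyGet? temp (j-1)).getD 0)) nswr) nswr
  (PySem.List.pyGet? nswr 0).getD 0

-- ===== PORT B =====
-- Literal port of B: in-place circular buffer with moving cursor i.
-- buf[i] = buf[i-1] + buf[i] is List.set at i.toNat (cursor stays in [0, m), in range);
-- the reads buf[i-1] / buf[i] / buf[i-1] at the end use pyGet? (Python's negative
-- index wrap at i = 0 is exactly pyGet?'s behaviour).
def climb_stairs_m_alt (n : Int) (m : Int) : Int :=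
  let buf : List Int := List.replicate m.toNat 1       -- [1] * m
  let i : Int := 0
  let st :=
    (PySem.List.pyRange 0 (n - m + 1) 1).foldl (fun st _k =>
      let buf := st.1
      let i := st.2
      let buf := buf.set i.toNat
        (((PySem.List.pyGet? buf (i-1)).getD 0) + ((PySem.List.pyGet? buf i).getD 0))
      let i := if i + 1 < m then i + 1 else 0
      (buf, i)) (buf, i)
  (PySem.List.pyGet? st.1 (st.2 - 1)).getD 0

-- ===== PRECONDITION & SPEC =====
-- Pre_ excludes exactly m ≤ 0, where Python A raises IndexError ([1]*m is empty, so
-- nswr[m-1] in the loop — or nswr[0] at the return — fails).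
def Pre_climb_stairs_m (n : Int) (m : Int) : Prop := 1 ≤ m
instance (n : Int) (m : Int) : Decidable (Pre_climb_stairs_m n m) := by unfold Pre_climb_stairs_m; infer_instance
def pvWitness_climb_stairs_m : Int × Int := (7, 3)

def Spec_climb_stairs_m (n : Int) (m : Int) (out : Int) : Prop := out = climb_stairs_m_alt n m
instance (n : Int) (m : Int) (out : Int) : Decidable (Spec_climb_stairs_m n m out) := by unfold Spec_climb_stairs_m; infer_instance

-- ===== CLAIM (what is proved, stated in full; the proofs are below) =====
def Claim_equal_climb_stairs_m : Prop := ∀ (n : Int) (m : Int), Dom_climb_stairs_m n m → Pre_climb_stairs_m n m → Spec_climb_stairs_m n m (climb_stairs_m n m)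

-- ===== LEMMAS AND PROOFS =====
-- Invariant: A's buffer after any number of outer iterations is the reverse of B's
-- circular buffer read in circular order starting at B's cursor:
--   A-state = (buf.drop i ++ buf.take i).reverse.
-- Both steps write the same new value (last value + m-th-from-last value).

-- A's inner shift loop, fully unrolled over range r: it writes t[0..r-1] into slots 1..r of s.
lemma pv_fold_set_range (t s : List Int) (hs : s.length = t.length) :
    ∀ r, r < t.length →
    (List.range r).foldl (fun s' k => s'.set (k+1) (t[k]?.getD 0)) s
      = s.take 1 ++ t.take r ++ s.drop (r+1) := by
  intro r
  induction r with
  | zero =>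
    intro _
    simpa using (List.take_append_drop 1 s).symm
  | succ r ih =>
    intro hr
    rw [List.range_succ, List.foldl_append, ih (by omega)]
    simp only [List.foldl_cons, List.foldl_nil]
    have h1 : (s.take 1).length = 1 := by simp; omega
    have h2 : (t.take r).length = r := by simp; omega
    have hAB : (s.take 1 ++ t.take r).length = r + 1 := by rw [List.length_append, h1, h2]; omega
    rw [List.set_append, if_neg (by rw [hAB]; omega), hAB, Nat.sub_self]
    have hd : s.drop (r+1) = s[r+1] :: s.drop (r+2) := by
      rw [List.drop_eq_getElem_cons (by omega)]
    have hr' : r < t.length := by omega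
    have ht : t.take (r+1) = t.take r ++ [t[r]] := by
      rw [List.take_add_one]; simp [List.getElem?_eq_getElem hr']
    rw [hd, List.set_cons_zero, List.getElem?_eq_getElem hr', Option.getD_some, ht]
    simp only [List.append_assoc, List.cons_append, List.nil_append]

-- one whole A-step in closed form: new value consed onto the old buffer minus its last slot
lemma pv_stepA (m : Int) (hm : 1 ≤ m) (a : List Int) (ha : a.length = m.toNat) (x : Int) :
    (PySem.List.pyRange 1 m 1).foldl
      (fun ns j => ns.set j.toNat ((PySem.List.pyGet? a (j - 1)).getD 0)) (a.set 0 x)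
    = x :: a.take (m.toNat - 1) := by
  rw [PySem.List.pyRange_one, List.foldl_map]
  have hidx : ∀ (ns : List Int) (k : Nat),
      ns.set ((1+(k:Int)).toNat) ((PySem.List.pyGet? a ((1+(k:Int)) - 1)).getD 0)
      = ns.set (k+1) (a[k]?.getD 0) := by
    intro ns k
    congr 1
    · omega
    · congr 1
      rw [show (1+(k:Int))-1 = (k:Int) by ring, PySem.List.pyGet?_natCast]
  simp only [hidx]
  rw [pv_fold_set_range a _ (by simp) (m-1).toNat (by omega)]
  obtain ⟨hd, tl, hcons⟩ : ∃ hd tl, a = hd :: tl := by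
    cases a with
    | nil => simp at ha; omega
    | cons p q => exact ⟨p, q, rfl⟩
  have htake1 : (a.set 0 x).take 1 = [x] := by rw [hcons, List.set_cons_zero]; rfl
  have hdrop : (a.set 0 x).drop ((m-1).toNat + 1) = [] := by
    apply List.drop_eq_nil_of_le
    simp only [List.length_set, ha]
    omega
  rw [htake1, hdrop, show (m-1).toNat = m.toNat - 1 by omega]
  simp

-- B's read buf[i-1] is the head of A's buffer
lemma pv_read (m : Int) (buf : List Int) (i : Int) (hb : buf.length = m.toNat)
    (hm : 1 ≤ m) (h0 : 0 ≤ i) (him : i < m) :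
    PySem.List.pyGet? buf (i-1) = ((buf.drop i.toNat ++ buf.take i.toNat).reverse)[0]? := by
  rcases eq_or_lt_of_le h0 with h | h
  · rw [← h, show (0:Int)-1 = -1 by ring, PySem.List.pyGet?_neg_one]
    simp only [Int.toNat_zero, List.drop_zero, List.take_zero, List.append_nil]
    rw [← List.head?_eq_getElem?, List.head?_reverse]
  · rw [PySem.List.pyGet?_of_nonneg _ (by omega), ← List.head?_eq_getElem?,
        List.head?_reverse, List.getLast?_append]
    have ht : (buf.take i.toNat).getLast? = some buf[i.toNat - 1] := by
      rw [List.getLast?_eq_getElem?, List.length_take,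
          show min i.toNat buf.length = i.toNat by omega,
          List.getElem?_take_of_lt (by omega), List.getElem?_eq_getElem (by omega)]
    rw [ht, Option.some_or, show (i-1).toNat = i.toNat - 1 by omega,
        List.getElem?_eq_getElem (by omega)]

-- B's read buf[i] is the last element of A's buffer
lemma pv_read2 (m : Int) (buf : List Int) (i : Int) (hb : buf.length = m.toNat)
    (hm : 1 ≤ m) (h0 : 0 ≤ i) (him : i < m) :
    PySem.List.pyGet? buf i = ((buf.drop i.toNat ++ buf.take i.toNat).reverse)[m.toNat - 1]? := by
  rw [PySem.List.pyGet?_of_nonneg _ h0]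
  have horig : (buf.drop i.toNat ++ buf.take i.toNat).length = m.toNat := by
    simp only [List.length_append, List.length_drop, List.length_take]
    omega
  rw [List.getElem?_reverse (by rw [horig]; omega), horig,
      show m.toNat - 1 - (m.toNat - 1) = 0 by omega,
      List.getElem?_append_left (by simp only [List.length_drop]; omega),
      List.getElem?_drop]
  congr 1

-- writing the new value into slot i and advancing the cursor rotates A's buffer
lemma pv_rot (m : Int) (hm : 1 ≤ m) (buf : List Int) (i : Int) (x : Int)
    (hb : buf.length = m.toNat) (h0 : 0 ≤ i) (him : i < m) :
    ((buf.set i.toNat x).drop (if i + 1 < m then i + 1 else 0).toNat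
      ++ (buf.set i.toNat x).take (if i + 1 < m then i + 1 else 0).toNat).reverse
    = x :: ((buf.drop i.toNat ++ buf.take i.toNat).reverse).take (m.toNat - 1) := by
  have htail : ((buf.drop i.toNat ++ buf.take i.toNat).reverse).take (m.toNat - 1)
      = (buf.drop (i.toNat+1) ++ buf.take i.toNat).reverse := by
    have horig : (buf.drop i.toNat ++ buf.take i.toNat).length = m.toNat := by
      simp only [List.length_append, List.length_drop, List.length_take]
      omega
    rw [List.take_reverse, horig, show m.toNat - (m.toNat - 1) = 1 by omega,
        List.drop_append_of_le_length (by simp only [List.length_drop]; omega),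
        List.drop_drop]
  rw [htail]
  split_ifs with hlt
  · -- cursor advances: i' = i + 1
    rw [show (i+1).toNat = i.toNat + 1 by omega,
        List.drop_set, if_pos (by omega)]
    have h2 : (buf.set i.toNat x).take (i.toNat + 1) = buf.take i.toNat ++ [x] := by
      rw [List.take_set, List.take_add_one, List.getElem?_eq_getElem (by omega),
          List.set_append, if_neg (by simp only [List.length_take]; omega)]
      simp only [List.length_take, show min i.toNat buf.length = i.toNat by omega,
        Nat.sub_self, Option.toList_some, List.set_cons_zero]
    rw [h2, ← List.append_assoc, List.reverse_append, List.reverse_singleton,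
        List.singleton_append]
  · -- cursor wraps: i = m - 1, i' = 0
    have hi : i.toNat = m.toNat - 1 := by omega
    simp only [Int.toNat_zero, List.drop_zero, List.take_zero, List.append_nil]
    have hset : buf.set i.toNat x = buf.take i.toNat ++ [x] := by
      conv_lhs => rw [show buf = buf.take i.toNat ++ buf.drop i.toNat from
        (List.take_append_drop _ _).symm]
      rw [List.set_append, if_neg (by simp only [List.length_take]; omega),
          List.drop_eq_getElem_cons (by omega),
          show buf.drop (i.toNat + 1) = [] from List.drop_eq_nil_of_le (by omega)]
      simp only [List.length_take, show min i.toNat buf.length = i.toNat by omega,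
        Nat.sub_self, List.set_cons_zero]
    rw [hset, List.reverse_append, List.reverse_singleton, List.singleton_append,
        show buf.drop (i.toNat + 1) = [] from List.drop_eq_nil_of_le (by omega),
        List.nil_append]

-- the loop invariant, propagated over the whole outer loop
lemma pv_fold2 (m : Int) (hm : 1 ≤ m) (l : List Int) :
    ∀ (buf : List Int) (i : Int), buf.length = m.toNat → 0 ≤ i → i < m →
    (l.foldl (fun nswr (_i : Int) =>
        (PySem.List.pyRange 1 m 1).foldl (fun ns j =>
          ns.set j.toNat ((PySem.List.pyGet? nswr (j-1)).getD 0))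
          (nswr.set 0
            (((PySem.List.pyGet? nswr 0).getD 0) + ((PySem.List.pyGet? nswr (m-1)).getD 0))))
      ((buf.drop i.toNat ++ buf.take i.toNat).reverse)
      = ((l.foldl (fun (st : List Int × Int) (_k : Int) =>
            (st.1.set st.2.toNat
              (((PySem.List.pyGet? st.1 (st.2-1)).getD 0) + ((PySem.List.pyGet? st.1 st.2).getD 0)),
             if st.2 + 1 < m then st.2 + 1 else 0)) (buf, i)).1.drop
          (l.foldl (fun (st : List Int × Int) (_k : Int) =>
            (st.1.set st.2.toNat
              (((PySem.List.pyGet? st.1 (st.2-1)).getD 0) + ((PySem.List.pyGet? st.1 st.2).getD 0)),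
             if st.2 + 1 < m then st.2 + 1 else 0)) (buf, i)).2.toNat
        ++ (l.foldl (fun (st : List Int × Int) (_k : Int) =>
            (st.1.set st.2.toNat
              (((PySem.List.pyGet? st.1 (st.2-1)).getD 0) + ((PySem.List.pyGet? st.1 st.2).getD 0)),
             if st.2 + 1 < m then st.2 + 1 else 0)) (buf, i)).1.take
          (l.foldl (fun (st : List Int × Int) (_k : Int) =>
            (st.1.set st.2.toNat
              (((PySem.List.pyGet? st.1 (st.2-1)).getD 0) + ((PySem.List.pyGet? st.1 st.2).getD 0)),
             if st.2 + 1 < m then st.2 + 1 else 0)) (buf, i)).2.toNat).reverse)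
    ∧ (l.foldl (fun (st : List Int × Int) (_k : Int) =>
        (st.1.set st.2.toNat
          (((PySem.List.pyGet? st.1 (st.2-1)).getD 0) + ((PySem.List.pyGet? st.1 st.2).getD 0)),
         if st.2 + 1 < m then st.2 + 1 else 0)) (buf, i)).1.length = m.toNat
    ∧ 0 ≤ (l.foldl (fun (st : List Int × Int) (_k : Int) =>
        (st.1.set st.2.toNat
          (((PySem.List.pyGet? st.1 (st.2-1)).getD 0) + ((PySem.List.pyGet? st.1 st.2).getD 0)),
         if st.2 + 1 < m then st.2 + 1 else 0)) (buf, i)).2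
    ∧ (l.foldl (fun (st : List Int × Int) (_k : Int) =>
        (st.1.set st.2.toNat
          (((PySem.List.pyGet? st.1 (st.2-1)).getD 0) + ((PySem.List.pyGet? st.1 st.2).getD 0)),
         if st.2 + 1 < m then st.2 + 1 else 0)) (buf, i)).2 < m := by
  induction l with
  | nil =>
    intro buf i hb h0 him
    exact ⟨rfl, hb, h0, him⟩
  | cons c l ih =>
    intro buf i hb h0 him
    simp only [List.foldl_cons]
    have hlen : ((buf.drop i.toNat ++ buf.take i.toNat).reverse).length = m.toNat := by
      simp only [List.length_reverse, List.length_append, List.length_drop, List.length_take]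
      omega
    have e0 : PySem.List.pyGet? ((buf.drop i.toNat ++ buf.take i.toNat).reverse) 0
        = PySem.List.pyGet? buf (i-1) := by
      rw [PySem.List.pyGet?_zero]
      exact (pv_read m buf i hb hm h0 him).symm
    have e1 : PySem.List.pyGet? ((buf.drop i.toNat ++ buf.take i.toNat).reverse) (m-1)
        = PySem.List.pyGet? buf i := by
      rw [PySem.List.pyGet?_of_nonneg _ (by omega), show (m-1).toNat = m.toNat - 1 by omega]
      exact (pv_read2 m buf i hb hm h0 him).symm
    rw [pv_stepA m hm _ hlen, e0, e1, ← pv_rot m hm buf i _ hb h0 him]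
    exact ih _ _ (by simp [hb]) (by split_ifs <;> omega) (by split_ifs <;> omega)

-- ===== VERDICT (by name: the statement is the Claim_ definition above) =====
theorem climb_stairs_m_spec : Claim_equal_climb_stairs_m := by
  intro n m _ hm
  have hm' : (1:Int) ≤ m := hm
  unfold Spec_climb_stairs_m
  have hA : climb_stairs_m n m =
      (PySem.List.pyGet? ((PySem.List.pyRange 0 (n - m + 1) 1).foldl
        (fun nswr (_i : Int) =>
          (PySem.List.pyRange 1 m 1).foldl (fun ns j =>
            ns.set j.toNat ((PySem.List.pyGet? nswr (j-1)).getD 0))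
            (nswr.set 0 (((PySem.List.pyGet? nswr 0).getD 0) + ((PySem.List.pyGet? nswr (m-1)).getD 0))))
        (List.replicate m.toNat 1)) 0).getD 0 := rfl
  have hB : climb_stairs_m_alt n m =
      (PySem.List.pyGet? ((PySem.List.pyRange 0 (n - m + 1) 1).foldl
        (fun (st : List Int × Int) (_k : Int) =>
          (st.1.set st.2.toNat
            (((PySem.List.pyGet? st.1 (st.2-1)).getD 0) + ((PySem.List.pyGet? st.1 st.2).getD 0)),
           if st.2 + 1 < m then st.2 + 1 else 0)) (List.replicate m.toNat 1, 0)).1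
        (((PySem.List.pyRange 0 (n - m + 1) 1).foldl
        (fun (st : List Int × Int) (_k : Int) =>
          (st.1.set st.2.toNat
            (((PySem.List.pyGet? st.1 (st.2-1)).getD 0) + ((PySem.List.pyGet? st.1 st.2).getD 0)),
           if st.2 + 1 < m then st.2 + 1 else 0)) (List.replicate m.toNat 1, 0)).2 - 1)).getD 0 := rfl
  rw [hA, hB]
  obtain ⟨hEq, hLen, h0, hmlt⟩ := pv_fold2 m hm' (PySem.List.pyRange 0 (n - m + 1) 1)
    (List.replicate m.toNat 1) 0 (by simp) le_rfl (by omega)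
  rw [show (((List.replicate m.toNat (1:Int)).drop (0:Int).toNat
      ++ (List.replicate m.toNat (1:Int)).take (0:Int).toNat).reverse) = List.replicate m.toNat 1
    by simp] at hEq
  rw [hEq, PySem.List.pyGet?_zero, ← pv_read m _ _ hLen hm' h0 hmlt]
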